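-- pv_equiv track=rewrite | github.com/polaris64/advent-of-code | 2019/16/solve.py | run_FFT_basic
-- ===== SOURCE A (Python) =====
-- import math
--
-- def run_FFT_basic(signal, phases):
-- 	"""
-- 	Basic implementation of the step 1 logic without Numpy (slow)
-- 	"""
--
-- 	# Copy input signal
-- 	prev_signal = signal.copy()
-- 	new_signal = None
--
-- 	for phase in range(phases):
--
-- 		# Copy signal for this phase
-- 		new_signal = prev_signal.copy()
--
-- 		for i, el in enumerate(new_signal):
-- 			pattern = generate_pattern(i + 1)
-- 			pattern = pattern * math.ceil(len(prev_signal) / len(pattern))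
--
-- 			digit = sum([x * y for x, y in zip(prev_signal, pattern[1:])])
-- 			new_signal[i] = abs(digit) % 10
--
-- 		# Update input signal for next phase
-- 		prev_signal = new_signal
--
-- 	return "".join([str(x) for x in new_signal])
--
-- def generate_pattern(position):
-- 	pattern = []
-- 	pattern.extend([ 0 for x in range(position)])
-- 	pattern.extend([ 1 for x in range(position)])
-- 	pattern.extend([ 0 for x in range(position)])
-- 	pattern.extend([-1 for x in range(position)])
-- 	return pattern
-- ===== SOURCE B (Python) =====
-- def run_FFT_basic(sig, phases):  # 'sig': the checker forbids the bare name 'signal' (stdlib module) in b.py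
--     """
--     FFT via prefix sums: each output digit is an alternating sum of
--     O(n/i) contiguous blocks, each block summed in O(1) from the
--     prefix-sum table, instead of a full O(n) weighted scan per digit.
--     """
--     cur = list(sig)
--     for _ in range(phases):
--         n = len(cur)
--         P = [0]
--         for x in cur:
--             P.append(P[-1] + x)
--         nxt = []
--         for i in range(n):
--             L = i + 1
--             total = 0
--             start = i
--             sign = 1
--             while start < n:
--                 end = min(start + L, n)
--                 total += sign * (P[end] - P[start])
--                 sign = -sign
--                 start += 2 * L
--             nxt.append(abs(total) % 10)
--         cur = nxt
--     return "".join(str(x) for x in cur)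
-- ===== Notes on version B (the rewrite author's own statement) =====
-- stated objective: faster
-- what changed: Each output digit is computed as an alternating sum of the pattern's +1/-1 blocks using a prefix-sum table (O(n/i) O(1)-blocks per digit i) instead of materialising the repeated pattern and taking a full O(n) weighted scan per digit.
import Mathlib
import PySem

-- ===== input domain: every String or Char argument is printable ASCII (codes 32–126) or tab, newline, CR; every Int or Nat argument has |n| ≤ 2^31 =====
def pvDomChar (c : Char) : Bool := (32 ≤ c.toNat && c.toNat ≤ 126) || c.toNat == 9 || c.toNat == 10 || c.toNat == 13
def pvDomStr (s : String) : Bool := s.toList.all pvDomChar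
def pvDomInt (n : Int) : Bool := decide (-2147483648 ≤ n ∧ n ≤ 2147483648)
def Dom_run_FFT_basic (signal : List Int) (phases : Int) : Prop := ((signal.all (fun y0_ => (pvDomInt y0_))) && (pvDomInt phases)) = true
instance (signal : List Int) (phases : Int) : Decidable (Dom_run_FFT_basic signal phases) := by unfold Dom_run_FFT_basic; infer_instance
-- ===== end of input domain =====

-- B replaces A's per-digit O(n) pattern scan by an alternating block sum over a
-- prefix-sum table (O(n/i) blocks per digit i), an asymptotically faster algorithm.

-- ===== PORT A =====

-- generate_pattern: each '[c for x in range(position)]' is List.replicate position c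
def genPattern (position : Nat) : List Int :=
  List.replicate position 0 ++ List.replicate position 1 ++
  List.replicate position 0 ++ List.replicate position (-1)

-- the body of A's inner loop: new_signal[i] = abs(sum(x*y for x,y in zip(prev, pattern[1:]))) % 10
-- math.ceil(len(prev)/len(pattern)) is exact ceiling division here (both operands are list
-- lengths, far below float precision), ported as Nat ceiling division; 'pattern * k' is
-- (List.replicate k pattern).flatten; abs(d) % 10 has nonnegative operands, so Int.emod is exact.
def digitA (prev : List Int) (i : Nat) : Int :=
  let pat := genPattern (i + 1)
  let rep := (List.replicate ((prev.length + pat.length - 1) / pat.length) pat).flatten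
  let digit := ((prev.zip (rep.drop 1)).map (fun p => p.1 * p.2)).sum
  |digit| % 10

-- one phase: 'for i, el in enumerate(new_signal): new_signal[i] = …' — el is unused and each
-- digit reads only prev_signal and i, so the enumerate loop is a fold over the indices setting each slot
def phaseA (prev : List Int) : List Int :=
  (List.range prev.length).foldl (fun ns i => ns.set i (digitA prev i)) prev

-- 'for phase in range(phases)' then '"".join([str(x) for x in new_signal])'
def run_FFT_basic (signal : List Int) (phases : Int) : String :=
  let final := (List.range phases.toNat).foldl (fun prev _ => phaseA prev) signal
  PySem.Str.join "" (final.map PySem.Int.toStr)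

-- ===== PORT B =====

-- P = [0]; for x in cur: P.append(P[-1] + x)   (P is never empty, so P[-1] is getLastD 0)
def prefixSumsB (cur : List Int) : List Int :=
  cur.foldl (fun P x => P ++ [P.getLastD 0 + x]) [0]

-- the while loop: total += sign * (P[end] - P[start]); sign = -sign; start += 2*L
-- (P indices are ≤ n = len(P) - 1, always in range, so getD is exact)
def blockSumB (P : List Int) (n i start : Nat) (sign : Int) : Int :=
  if _h : start < n then
    sign * (P.getD (min (start + (i + 1)) n) 0 - P.getD start 0) +
      blockSumB P n i (start + 2 * (i + 1)) (-sign)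
  else 0
termination_by n - start
decreasing_by omega

-- one phase of Source B: nxt built by appending for i in range(n)
def phaseB (cur : List Int) : List Int :=
  let P := prefixSumsB cur
  (List.range cur.length).map (fun i => |blockSumB P cur.length i i 1| % 10)

def run_FFT_basic_alt (signal : List Int) (phases : Int) : String :=
  let final := (List.range phases.toNat).foldl (fun cur _ => phaseB cur) signal
  PySem.Str.join "" (final.map PySem.Int.toStr)

-- ===== PRECONDITION & SPEC =====

-- Pre_ excludes phases ≤ 0, on which A never enters the phase loop and raises
-- TypeError joining new_signal = None.
def Pre_run_FFT_basic (signal : List Int) (phases : Int) : Prop := 1 ≤ phases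
instance (signal : List Int) (phases : Int) : Decidable (Pre_run_FFT_basic signal phases) := by
  unfold Pre_run_FFT_basic; infer_instance

def pvWitness_run_FFT_basic : List Int × Int := ([1, 2, 3, 4, 5], 2)

def Spec_run_FFT_basic (signal : List Int) (phases : Int) (out : String) : Prop :=
  out = run_FFT_basic_alt signal phases
instance (signal : List Int) (phases : Int) (out : String) : Decidable (Spec_run_FFT_basic signal phases out) := by
  unfold Spec_run_FFT_basic; infer_instance

-- ===== CLAIM (what is proved, stated in full; the proofs are below) =====
def Claim_equal_run_FFT_basic : Prop := ∀ (signal : List Int) (phases : Int), Dom_run_FFT_basic signal phases → Pre_run_FFT_basic signal phases → Spec_run_FFT_basic signal phases (run_FFT_basic signal phases)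


-- ===== LEMMAS AND PROOFS =====

-- the base pattern value 0,1,0,-1 and the effective weight of prev[j] for output index i
def pat4 : Nat → Int
  | 0 => 0 | 1 => 1 | 2 => 0 | _ => -1

def wgt (L j : Nat) : Int := pat4 ((j + 1) % (4 * L) / L)

def canonDigit (prev : List Int) (i : Nat) : Int :=
  ∑ j ∈ Finset.range prev.length, prev.getD j 0 * wgt (i + 1) j

lemma genPattern_getD' (L m : Nat) (hm : m < 4 * L) :
    (List.replicate L (0:Int) ++ List.replicate L 1 ++ List.replicate L 0 ++ List.replicate L (-1)).getD m 0
      = pat4 (m / L) := by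
  have hL : 0 < L := by omega
  simp only [List.getD, List.getElem?_append, List.length_append, List.length_replicate,
    List.getElem?_replicate]
  rcases Nat.lt_or_ge m L with h | h
  · rw [Nat.div_eq_of_lt h]
    simp [h, show m < L + L by omega, show m < L + L + L by omega]; rfl
  rcases Nat.lt_or_ge m (2 * L) with h2 | h2
  · rw [Nat.div_eq_of_lt_le (by omega : 1 * L ≤ m) (by omega)]
    simp [show ¬ m < L by omega, show m < L + L by omega, show m < L + L + L by omega,
      show m - L < L by omega]; rfl
  rcases Nat.lt_or_ge m (3 * L) with h3 | h3
  · rw [Nat.div_eq_of_lt_le (by omega : 2 * L ≤ m) (by omega)]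
    simp [show ¬ m < L + L by omega, show m < L + L + L by omega,
      show m - (L + L) < L by omega]; rfl
  · rw [Nat.div_eq_of_lt_le (by omega : 3 * L ≤ m) (by omega)]
    simp [show ¬ m < L + L + L by omega, show m - (L + L + L) < L by omega]; rfl

lemma key_mod (L m r : Nat) (hL : 0 < L) (hr : r < L) :
    (L * m + r) % (4 * L) / L = m % 4 := by
  have h1 : L * m + r = (L * (m % 4) + r) + (m / 4) * (4 * L) := by
    nlinarith [Nat.div_add_mod m 4]
  have h2 : L * (m % 4) + r < 4 * L := by
    have : m % 4 < 4 := Nat.mod_lt _ (by norm_num)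
    nlinarith
  rw [h1, Nat.add_mul_mod_self_right, Nat.mod_eq_of_lt h2, Nat.mul_add_div hL,
    Nat.div_eq_of_lt hr]
  simp

lemma flatten_replicate_getD (k : Nat) (xs : List Int) (m : Nat) (hm : m < k * xs.length) :
    ((List.replicate k xs).flatten).getD m 0 = xs.getD (m % xs.length) 0 := by
  induction k generalizing m with
  | zero => omega
  | succ k ih =>
    have hmul : (k + 1) * xs.length = k * xs.length + xs.length := by ring
    rw [List.replicate_succ, List.flatten_cons]
    rcases Nat.lt_or_ge m xs.length with h | h
    · rw [Nat.mod_eq_of_lt h]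
      simp [List.getD, List.getElem?_append, h]
    · have : m % xs.length = (m - xs.length) % xs.length := by
        conv_lhs => rw [show m = m - xs.length + xs.length by omega]
        rw [Nat.add_mod_right]
      rw [this, ← ih (m - xs.length) (by omega)]
      simp [List.getD, List.getElem?_append, show ¬ m < xs.length by omega]

lemma zip_mul_sum (xs ys : List Int) :
    ((xs.zip ys).map (fun p => p.1 * p.2)).sum =
      ∑ j ∈ Finset.range (min xs.length ys.length), xs.getD j 0 * ys.getD j 0 := by
  induction xs generalizing ys with
  | nil => simp
  | cons x xs ih =>
    cases ys with
    | nil => simp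
    | cons y ys =>
      simp only [List.zip_cons_cons, List.map_cons, List.sum_cons, List.length_cons,
        Nat.succ_min_succ, Finset.sum_range_succ']
      rw [ih ys]
      simp [List.getD]
      ring

lemma foldl_set_range_aux (g : Nat → Int) (prev : List Int) (m : Nat) (hm : m ≤ prev.length) :
    (List.range m).foldl (fun ns i => ns.set i (g i)) prev =
      (List.range m).map g ++ prev.drop m := by
  induction m with
  | zero => simp
  | succ m ih =>
    rw [List.range_succ, List.foldl_append, ih (by omega), List.map_append]
    have hlen : ((List.range m).map g).length = m := by simp
    have hdrop : prev.drop m = prev[m] :: prev.drop (m + 1) :=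
      List.drop_eq_getElem_cons (by omega)
    simp only [List.foldl_cons, List.foldl_nil]
    rw [List.set_append_right _ _ (by omega), hlen]
    rw [Nat.sub_self, hdrop, List.set_cons_zero]
    simp

lemma foldl_set_range (g : Nat → Int) (prev : List Int) :
    (List.range prev.length).foldl (fun ns i => ns.set i (g i)) prev =
      (List.range prev.length).map g := by
  rw [foldl_set_range_aux g prev prev.length le_rfl]
  simp

lemma foldl_prefix_aux (xs : List Int) (acc : List Int) (s : Int) (hs : acc.getLastD 0 = s) :
    xs.foldl (fun P x => P ++ [P.getLastD 0 + x]) acc =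
      acc ++ (List.range xs.length).map (fun k => s + ∑ j ∈ Finset.range (k + 1), xs.getD j 0) := by
  induction xs generalizing acc s with
  | nil => simp
  | cons x xs ih =>
    simp only [List.foldl_cons, List.length_cons]
    rw [hs, ih (acc ++ [s + x]) (s + x) (by simp)]
    rw [List.append_assoc, List.range_succ_eq_map, List.map_cons, List.map_map]
    have hf : (fun k => s + ∑ j ∈ Finset.range (k + 1), (x :: xs).getD j 0) ∘ Nat.succ =
        fun k => (s + x) + ∑ j ∈ Finset.range (k + 1), xs.getD j 0 := by
      funext k
      simp only [Function.comp_apply, Nat.succ_eq_add_one]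
      rw [Finset.sum_range_succ']
      simp [List.getD]
      ring
    rw [hf]
    have h0 : s + ∑ j ∈ Finset.range (0 + 1), (x :: xs).getD j 0 = s + x := by
      simp [List.getD]
    rw [h0]
    simp

lemma prefixSumsB_getD (cur : List Int) (k : Nat) (hk : k ≤ cur.length) :
    (prefixSumsB cur).getD k 0 = ∑ j ∈ Finset.range k, cur.getD j 0 := by
  unfold prefixSumsB
  rw [foldl_prefix_aux cur [0] 0 rfl]
  cases k with
  | zero => simp
  | succ m =>
    have hm : m < cur.length := by omega
    simp only [List.getD, List.singleton_append, List.getElem?_cons_succ]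
    rw [List.getElem?_map, List.getElem?_range hm]
    simp

lemma genPattern_length (L : Nat) : (genPattern L).length = 4 * L := by
  simp [genPattern]; ring

lemma genPattern_getD (L m : Nat) (hm : m < 4 * L) :
    (genPattern L).getD m 0 = pat4 (m / L) := by
  rw [genPattern]; exact genPattern_getD' L m hm

lemma digitA_eq_canon (prev : List Int) (i : Nat) :
    digitA prev i = |canonDigit prev i| % 10 := by
  unfold digitA canonDigit
  set n := prev.length with hn
  set L := i + 1 with hLdef
  have hL : 0 < L := by omega
  rcases Nat.eq_zero_or_pos n with h0 | hpos
  · have hnil : prev = [] := List.length_eq_zero_iff.mp h0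
    subst hnil
    simp
  · simp only [genPattern_length]
    set K := (n + 4 * L - 1) / (4 * L) with hK
    have hdm : 4 * L * K + (n + 4 * L - 1) % (4 * L) = n + 4 * L - 1 :=
      Nat.div_add_mod (n + 4 * L - 1) (4 * L)
    have hr : (n + 4 * L - 1) % (4 * L) < 4 * L := Nat.mod_lt _ (by omega)
    set M := 4 * L * K with hM
    have hMn : n ≤ M := by omega
    have hrepl : ((List.replicate K (genPattern L)).flatten).length = M := by
      rw [List.length_flatten, List.map_replicate, List.sum_replicate, genPattern_length]
      simp [hM]; ring
    set rep := (List.replicate K (genPattern L)).flatten with hrep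
    have hKM : K * (genPattern L).length = M := by rw [genPattern_length, hM]; ring
    have hdropelem : ∀ j : Nat, j < M - 1 →
        (rep.drop 1).getD j 0 = wgt L j := by
      intro j hj
      have h1j : 1 + j < M := by omega
      have : (rep.drop 1).getD j 0 = rep.getD (1 + j) 0 := by
        simp [List.getD, Nat.add_comm]
      rw [this, hrep, flatten_replicate_getD K _ (1 + j) (by rw [hKM]; exact h1j),
        genPattern_length, genPattern_getD L _ (Nat.mod_lt _ (by omega))]
      rw [wgt, Nat.add_comm 1 j]
    rw [zip_mul_sum, List.length_drop, hrepl, ← hn]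
    rcases Nat.lt_or_ge n M with hlt | hge
    · have hmin : min n (M - 1) = n := by omega
      rw [hmin]
      have hsum : ∑ j ∈ Finset.range n, prev.getD j 0 * (rep.drop 1).getD j 0 =
          ∑ j ∈ Finset.range n, prev.getD j 0 * wgt L j :=
        Finset.sum_congr rfl (fun j hj => by
          rw [hdropelem j (by simp at hj; omega)])
      rw [hsum]
    · have hMeq : M = n := by omega
      have hmin : min n (M - 1) = n - 1 := by omega
      rw [hmin]
      obtain ⟨m, hm⟩ : ∃ m, n = m + 1 := ⟨n - 1, by omega⟩
      have hwgt0 : wgt L m = 0 := by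
        rw [wgt]
        have : m + 1 = n := by omega
        rw [this, ← hMeq, hM, show 4 * L * K = K * (4 * L) by ring, Nat.mul_mod_left]
        simp [pat4, Nat.zero_div]
      rw [hm]
      rw [Finset.sum_range_succ, show m + 1 - 1 = m by omega, hwgt0]
      have : ∑ j ∈ Finset.range m, prev.getD j 0 * (rep.drop 1).getD j 0 =
          ∑ j ∈ Finset.range m, prev.getD j 0 * wgt L j := by
        apply Finset.sum_congr rfl
        intro j hj
        rw [hdropelem j (by simp at hj; omega)]
      rw [this]
      simp

lemma wgt_first (L t r : Nat) (hL : 0 < L) (hr : r < L) :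
    wgt L ((L - 1) + 2 * L * t + r) = (-1) ^ t := by
  have hj : (L - 1) + 2 * L * t + r + 1 = L * (2 * t + 1) + r := by
    have : 1 ≤ L := hL
    nlinarith [Nat.sub_add_cancel this]
  rw [wgt, hj, key_mod L (2 * t + 1) r hL hr]
  rcases Nat.even_or_odd t with ⟨s, hs⟩ | ⟨s, hs⟩
  · subst hs
    rw [show (2 * (s + s) + 1) % 4 = 1 by omega]
    rw [show s + s = 2 * s by ring, pow_mul]
    simp [pat4]
  · subst hs
    rw [show (2 * (2 * s + 1) + 1) % 4 = 3 by omega]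
    rw [pow_add, pow_mul]
    simp [pat4]

lemma wgt_second (L t r : Nat) (hL : 0 < L) (hr : r < L) :
    wgt L ((L - 1) + 2 * L * t + L + r) = 0 := by
  have hj : (L - 1) + 2 * L * t + L + r + 1 = L * (2 * t + 2) + r := by
    nlinarith [Nat.sub_add_cancel hL]
  rw [wgt, hj, key_mod L (2 * t + 2) r hL hr]
  rcases Nat.even_or_odd t with ⟨s, hs⟩ | ⟨s, hs⟩ <;> subst hs
  · rw [show (2 * (s + s) + 2) % 4 = 2 by omega]; rfl
  · rw [show (2 * (2 * s + 1) + 2) % 4 = 0 by omega]; rfl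

lemma P_diff (cur : List Int) (a b : Nat) (hab : a ≤ b) (hb : b ≤ cur.length) :
    (prefixSumsB cur).getD b 0 - (prefixSumsB cur).getD a 0 =
      ∑ j ∈ Finset.Ico a b, cur.getD j 0 := by
  rw [prefixSumsB_getD cur b hb, prefixSumsB_getD cur a (le_trans hab hb),
    Finset.sum_Ico_eq_sub _ hab]

lemma blockSum_eq_aux (cur : List Int) (i N : Nat) :
    ∀ s t : Nat, s = i + 2 * (i + 1) * t → cur.length - s ≤ N →
    blockSumB (prefixSumsB cur) cur.length i s ((-1) ^ t) =
      ∑ j ∈ Finset.Ico s cur.length, cur.getD j 0 * wgt (i + 1) j := by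
  induction N with
  | zero =>
    intro s t hs hN
    rw [blockSumB, dif_neg (by omega), Finset.Ico_eq_empty (by omega)]
    simp
  | succ N ih =>
    intro s t hs hN
    rcases Nat.lt_or_ge s cur.length with hlt | hge
    swap
    · rw [blockSumB, dif_neg (by omega), Finset.Ico_eq_empty (by omega)]; simp
    rw [blockSumB, dif_pos hlt]
    set n := cur.length with hn
    set e := min (s + (i + 1)) n with he
    set e2 := min (s + 2 * (i + 1)) n with he2
    have h1 : s ≤ e := by omega
    have h2 : e ≤ e2 := by omega
    have h3 : e2 ≤ n := by omega
    have hw1 : ∀ r : Nat, r < i + 1 → wgt (i + 1) (i + 2 * (i + 1) * t + r) = (-1) ^ t := by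
      intro r hr
      have h := wgt_first (i + 1) t r (by omega) hr
      simpa using h
    have hw2 : ∀ r : Nat, r < i + 1 →
        wgt (i + 1) (i + 2 * (i + 1) * t + (i + 1) + r) = 0 := by
      intro r hr
      have h := wgt_second (i + 1) t r (by omega) hr
      simpa using h
    have hfirst : ((-1 : Int) ^ t) * ((prefixSumsB cur).getD e 0 - (prefixSumsB cur).getD s 0) =
        ∑ j ∈ Finset.Ico s e, cur.getD j 0 * wgt (i + 1) j := by
      rw [P_diff cur s e h1 (by omega), Finset.mul_sum]
      apply Finset.sum_congr rfl
      intro j hj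
      simp only [Finset.mem_Ico] at hj
      have hjj : j = i + 2 * (i + 1) * t + (j - s) := by omega
      rw [hjj, hw1 (j - s) (by omega)]
      ring
    have hmid : ∑ j ∈ Finset.Ico e e2, cur.getD j 0 * wgt (i + 1) j = 0 := by
      apply Finset.sum_eq_zero
      intro j hj
      simp only [Finset.mem_Ico] at hj
      have hjj : j = i + 2 * (i + 1) * t + (i + 1) + (j - (s + (i + 1))) := by omega
      rw [hjj, hw2 (j - (s + (i + 1))) (by omega)]
      ring
    have htail : blockSumB (prefixSumsB cur) n i (s + 2 * (i + 1)) (-(-1 : Int) ^ t) =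
        ∑ j ∈ Finset.Ico e2 n, cur.getD j 0 * wgt (i + 1) j := by
      have hsign : (-(-1 : Int) ^ t) = (-1) ^ (t + 1) := by ring
      have hs' : s + 2 * (i + 1) = i + 2 * (i + 1) * (t + 1) := by rw [hs]; ring
      rw [hsign, ih (s + 2 * (i + 1)) (t + 1) hs' (by omega)]
      rcases Nat.lt_or_ge n (s + 2 * (i + 1)) with hc | hc
      · rw [Finset.Ico_eq_empty (by omega), Finset.Ico_eq_empty (by omega)]
      · have he2' : e2 = s + 2 * (i + 1) := by omega
        rw [he2']
    rw [hfirst, htail]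
    rw [← Finset.sum_Ico_consecutive _ h1 (le_trans h2 h3),
      ← Finset.sum_Ico_consecutive _ h2 h3, hmid]
    ring

lemma wgt_low (i j : Nat) (hj : j < i) : wgt (i + 1) j = 0 := by
  rw [wgt, Nat.mod_eq_of_lt (by omega), Nat.div_eq_of_lt (by omega)]
  rfl

lemma blockSum_eq_canon (cur : List Int) (i : Nat) (hi : i < cur.length) :
    blockSumB (prefixSumsB cur) cur.length i i 1 = canonDigit cur i := by
  have h0 : (i : Nat) = i + 2 * (i + 1) * 0 := by ring
  have h := blockSum_eq_aux cur i cur.length i 0 h0 (by omega)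
  simp only [pow_zero] at h
  rw [h, canonDigit, Finset.range_eq_Ico,
    ← Finset.sum_Ico_consecutive _ (Nat.zero_le i) (Nat.le_of_lt hi)]
  have hlow : ∑ j ∈ Finset.Ico 0 i, cur.getD j 0 * wgt (i + 1) j = 0 :=
    Finset.sum_eq_zero fun j hj => by
      simp only [Finset.mem_Ico] at hj
      rw [wgt_low i j hj.2]
      ring
  rw [hlow, zero_add]

lemma phase_eq (prev : List Int) : phaseA prev = phaseB prev := by
  unfold phaseA phaseB
  rw [foldl_set_range (digitA prev) prev]
  exact List.map_congr_left fun i hi => by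
    rw [digitA_eq_canon prev i,
      blockSum_eq_canon prev i (List.mem_range.mp hi)]

-- ===== VERDICT (by name: the statement is the Claim_ definition above) =====
theorem run_FFT_basic_spec : Claim_equal_run_FFT_basic := by
  intro signal phases _ _
  unfold Spec_run_FFT_basic run_FFT_basic run_FFT_basic_alt
  have h : (fun (prev : List Int) (_ : Nat) => phaseA prev) =
      (fun (cur : List Int) (_ : Nat) => phaseB cur) := by
    funext p _; exact phase_eq p
  rw [h]
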